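-- pv_equiv track=rewrite | github.com/arjunsatyapal/lantern | demo/py/video.py | _BuildCourseList
-- ===== SOURCE A (Python) =====
-- def _BuildCourseList(course_list, course_map, user_progress, ncols):
--   """Builds a list rows entries for the tabular view.
--
--   Args:
--     course_list: List of topic IDs.
--     course_map: A map of topic tuples: (title, description)l
--     user_progress: Map of topics completed by the user, keyed by topic ID.
--     ncols: Number of columns per row.
--
--   Returns:
--     A list of list of tuples.
--       - First level list is rows
--       - Next level is columns
--       - Tuple is (index, id, title, description)
--   """
--   rows = []
--   for idx, id in enumerate(course_list):
--     if idx % ncols == 0: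
--       cols = []
--       rows.append(cols)
--     title, desc = course_map.get(id, ('', ''))
--     cols.append((idx + 1, id, title, desc, user_progress.get(id, False)))
--   return rows
-- ===== SOURCE B (Python) =====
-- def _BuildCourseList(course_list, course_map, user_progress, ncols):
--   """Table-then-reshape: build the flat entry list, then slice it into rows."""
--   entries = [(i + 1, id) + course_map.get(id, ('', '')) + (user_progress.get(id, False),)
--              for i, id in enumerate(course_list)]
--   return [entries[i:i + ncols] for i in range(0, len(entries), ncols)]
-- ===== Notes on version B (the rewrite author's own statement) =====
-- stated objective: alternative
-- what changed: A builds rows in one interleaved pass, opening a new row whenever idx % ncols == 0 and appending to the aliased current row; B first builds the flat list of all entry tuples in one comprehension and then reshapes it into rows by stepped slicing entries[i:i+ncols] for i in range(0, len(entries), ncols).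
-- outside the precondition, e.g. on _BuildCourseList(['a'], {}, {}, 0): A raises ZeroDivisionError, B raises ValueError; on _BuildCourseList([], {}, {}, 0): A returns [], B raises ValueError; on _BuildCourseList(['a'], {}, {}, -1): A returns [[(1, 'a', '', '', False)]], B returns []
import Mathlib
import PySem

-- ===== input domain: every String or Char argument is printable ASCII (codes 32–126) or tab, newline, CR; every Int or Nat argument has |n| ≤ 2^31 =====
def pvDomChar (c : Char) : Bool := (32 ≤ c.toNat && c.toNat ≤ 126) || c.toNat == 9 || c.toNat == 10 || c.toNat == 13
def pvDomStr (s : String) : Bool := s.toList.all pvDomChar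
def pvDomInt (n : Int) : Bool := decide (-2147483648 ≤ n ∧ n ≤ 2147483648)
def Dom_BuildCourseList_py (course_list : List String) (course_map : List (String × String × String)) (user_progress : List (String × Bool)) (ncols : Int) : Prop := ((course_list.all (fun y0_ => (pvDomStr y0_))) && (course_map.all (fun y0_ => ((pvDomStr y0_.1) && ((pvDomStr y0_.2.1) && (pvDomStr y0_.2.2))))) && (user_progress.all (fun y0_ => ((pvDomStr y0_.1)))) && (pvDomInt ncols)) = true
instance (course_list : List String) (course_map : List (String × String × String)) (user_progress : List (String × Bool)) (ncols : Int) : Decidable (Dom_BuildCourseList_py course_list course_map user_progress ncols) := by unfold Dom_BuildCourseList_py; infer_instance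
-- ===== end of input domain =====

-- B replaces A's interleaved modulo-boundary row building by a two-phase table-then-reshape
-- decomposition (flat entry list, then stepped slicing into rows); same cost, different structure.


-- ===== PORT A =====
-- Python's `cols.append(...)` mutates the list aliased as the last element of `rows`:
-- modelled by appending to the last row of the rows list.
def pvAppendLast {α : Type} (rows : List (List α)) (e : α) : List (List α) :=
  match rows with
  | [] => []
  | [r] => [r ++ [e]]
  | r :: s :: t => r :: pvAppendLast (s :: t) e

def BuildCourseList_py (course_list : List String) (course_map : List (String × String × String)) (user_progress : List (String × Bool)) (ncols : Int) : List (List (Int × String × String × String × Bool)) :=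
  (PySem.List.enumerate course_list).foldl
    (fun rows idxid =>
      let rows := if PySem.Int.mod idxid.1 ncols == 0 then rows ++ [[]] else rows
      let td := PySem.Dict.getD (PySem.Dict.mk course_map) idxid.2 ("", "")
      pvAppendLast rows (idxid.1 + 1, idxid.2, td.1, td.2, PySem.Dict.getD (PySem.Dict.mk user_progress) idxid.2 false))
    []

-- ===== PORT B =====
def BuildCourseList_py_alt (course_list : List String) (course_map : List (String × String × String)) (user_progress : List (String × Bool)) (ncols : Int) : List (List (Int × String × String × String × Bool)) :=
  let entries := (PySem.List.enumerate course_list).map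
    (fun p =>
      let td := PySem.Dict.getD (PySem.Dict.mk course_map) p.2 ("", "")
      (p.1 + 1, p.2, td.1, td.2, PySem.Dict.getD (PySem.Dict.mk user_progress) p.2 false))
  (PySem.List.pyRange 0 (entries.length : Int) ncols).map
    (fun i => PySem.List.slice entries (some i) (some (i + ncols)))

-- ===== PRECONDITION & SPEC =====
-- Pre_ excludes ncols ≤ 0, where A raises ZeroDivisionError on non-empty input and otherwise
-- (negative ncols, or ncols = 0 with an empty list) A's value is an accident of Python's modulo
-- while B's stepped slicing raises ValueError or yields no rows.
def Pre_BuildCourseList_py (course_list : List String) (course_map : List (String × String × String)) (user_progress : List (String × Bool)) (ncols : Int) : Prop := 1 ≤ ncols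
instance (course_list : List String) (course_map : List (String × String × String)) (user_progress : List (String × Bool)) (ncols : Int) : Decidable (Pre_BuildCourseList_py course_list course_map user_progress ncols) := by unfold Pre_BuildCourseList_py; infer_instance

def pvWitness_BuildCourseList_py : List String × (List (String × String × String)) × (List (String × Bool)) × Int :=
  (["a", "b", "c"], [("a", "A title", "A desc")], [("a", true)], 2)

def Spec_BuildCourseList_py (course_list : List String) (course_map : List (String × String × String)) (user_progress : List (String × Bool)) (ncols : Int) (out : List (List (Int × String × String × String × Bool))) : Prop := out = BuildCourseList_py_alt course_list course_map user_progress ncols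
instance (course_list : List String) (course_map : List (String × String × String)) (user_progress : List (String × Bool)) (ncols : Int) (out : List (List (Int × String × String × String × Bool))) : Decidable (Spec_BuildCourseList_py course_list course_map user_progress ncols out) := by unfold Spec_BuildCourseList_py; infer_instance

-- ===== CLAIM (what is proved, stated in full; the proofs are below) =====
def Claim_equal_BuildCourseList_py : Prop := ∀ (course_list : List String) (course_map : List (String × String × String)) (user_progress : List (String × Bool)) (ncols : Int), Dom_BuildCourseList_py course_list course_map user_progress ncols → Pre_BuildCourseList_py course_list course_map user_progress ncols → Spec_BuildCourseList_py course_list course_map user_progress ncols (BuildCourseList_py course_list course_map user_progress ncols)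

-- ===== LEMMAS AND PROOFS =====

-- Chunks of size m+1: the common normal form both ports are reduced to.
def pvChunks {α : Type} (m : Nat) : List α → List (List α)
  | [] => []
  | x :: xs => (x :: xs.take m) :: pvChunks m (xs.drop m)
termination_by l => l.length
decreasing_by simp

theorem pvAppendLast_append {α : Type} (e : α) (r : List α) :
    ∀ (rs : List (List α)), pvAppendLast (rs ++ [r]) e = rs ++ [r ++ [e]]
  | [] => rfl
  | [a] => rfl
  | a :: b :: t => by
      simpa [pvAppendLast] using pvAppendLast_append e r (b :: t)

def pvEntriesF {α : Type} (f : Int → String → α) (s : Int) (l : List String) : List α :=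
  (PySem.List.enumerate l s).map (fun p => f p.1 p.2)

theorem pvEntriesF_nil {α : Type} (f : Int → String → α) (s : Int) :
    pvEntriesF f s [] = [] := by
  simp [pvEntriesF, PySem.List.enumerate]

theorem pvEntriesF_cons {α : Type} (f : Int → String → α) (s : Int) (x : String) (l : List String) :
    pvEntriesF f s (x :: l) = f s x :: pvEntriesF f (s + 1) l := by
  simp [pvEntriesF, PySem.List.enumerate_cons]

theorem pvModSucc (j n : Nat) (hn : 0 < n) :
    (j + 1) % n = if j % n + 1 = n then 0 else j % n + 1 := by
  have hd := Nat.div_add_mod j n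
  have hr : j % n < n := Nat.mod_lt _ hn
  have hexp : n * (j / n + 1) = n * (j / n) + n := by ring
  split_ifs with h
  · have : j + 1 = n * (j / n + 1) := by omega
    rw [this, Nat.mul_mod_right]
  · have : j + 1 = n * (j / n) + (j % n + 1) := by omega
    rw [this, Nat.mul_add_mod]
    exact Nat.mod_eq_of_lt (by omega)

-- The invariant of A's fold: after processing index j the open row p has j % (m+1) + 1 entries.
theorem pvFoldA {α : Type} (m : Nat) (f : Int → String → α) :
    ∀ (l : List String) (j : Nat) (rows : List (List α)) (p : List α),
    p.length = j % (m + 1) + 1 →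
    List.foldl
      (fun rows q =>
        pvAppendLast (if PySem.Int.mod q.1 ((m : Int) + 1) == 0 then rows ++ [[]] else rows)
          (f q.1 q.2))
      (rows ++ [p]) (PySem.List.enumerate l ((j : Int) + 1))
    = rows ++ (p ++ (pvEntriesF f ((j : Int) + 1) l).take (m + 1 - p.length))
        :: pvChunks m ((pvEntriesF f ((j : Int) + 1) l).drop (m + 1 - p.length)) := by
  intro l
  induction l with
  | nil =>
    intro j rows p hp
    simp [PySem.List.enumerate, pvEntriesF_nil, pvChunks]
  | cons x xs ih =>
    intro j rows p hp
    have hcast : ((j : Int) + 1) = ((j + 1 : Nat) : Int) := by push_cast; ring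
    have hmod : PySem.Int.mod ((j : Int) + 1) ((m : Int) + 1)
        = (((j + 1) % (m + 1) : Nat) : Int) := by
      rw [hcast]
      exact_mod_cast PySem.Int.mod_natCast (j + 1) (m + 1)
    have hsucc := pvModSucc j (m + 1) (by omega)
    rw [PySem.List.enumerate_cons, List.foldl_cons, pvEntriesF_cons]
    by_cases hfull : p.length = m + 1
    · -- row is full: a fresh row is opened
      have hz : (j + 1) % (m + 1) = 0 := by rw [hsucc, if_pos (by omega)]
      rw [hmod, hz]
      simp only [Nat.cast_zero, beq_self_eq_true, if_pos]
      have happ : pvAppendLast ((rows ++ [p]) ++ [[]]) (f ((j:Int)+1) x)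
          = (rows ++ [p]) ++ [[f ((j:Int)+1) x]] := by
        simpa using pvAppendLast_append (f ((j:Int)+1) x) [] (rows ++ [p])
      rw [happ]
      have := ih (j + 1) (rows ++ [p]) [f ((j:Int)+1) x] (by simp [hz])
      rw [show ((j + 1 : Nat) : Int) + 1 = (j : Int) + 1 + 1 by push_cast; ring] at this
      rw [this]
      simp only [List.length_singleton, hfull, List.append_assoc, List.cons_append,
        List.nil_append]
      rw [Nat.sub_self, List.take_zero, List.drop_zero]
      have : pvChunks m (f ((j:Int)+1) x :: pvEntriesF f ((j:Int)+1+1) xs)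
          = (f ((j:Int)+1) x :: (pvEntriesF f ((j:Int)+1+1) xs).take m)
            :: pvChunks m ((pvEntriesF f ((j:Int)+1+1) xs).drop m) := by
        simp [pvChunks]
      rw [this]
      simp
    · -- row not full: append to the open row
      have hplt : p.length < m + 1 := by
        have : j % (m + 1) < m + 1 := Nat.mod_lt _ (by omega)
        omega
      have hnz : (j + 1) % (m + 1) = p.length := by
        rw [hsucc, if_neg (by omega)]; omega
      rw [hmod, hnz]
      have hcond : ¬ (((p.length : Nat) : Int) == 0) = true := by
        simp only [beq_iff_eq, Nat.cast_eq_zero]; omega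
      rw [if_neg hcond]
      rw [pvAppendLast_append]
      have := ih (j + 1) rows (p ++ [f ((j:Int)+1) x]) (by simp [hnz])
      rw [show ((j + 1 : Nat) : Int) + 1 = (j : Int) + 1 + 1 by push_cast; ring] at this
      rw [this]
      have hlen : (p ++ [f ((j:Int)+1) x]).length = p.length + 1 := by simp
      rw [hlen]
      have htk : (f ((j:Int)+1) x :: pvEntriesF f ((j:Int)+1+1) xs).take (m + 1 - p.length)
          = f ((j:Int)+1) x :: (pvEntriesF f ((j:Int)+1+1) xs).take (m + 1 - (p.length + 1)) := by
        rw [show m + 1 - p.length = (m + 1 - (p.length + 1)) + 1 by omega]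
        simp
      have hdr : (f ((j:Int)+1) x :: pvEntriesF f ((j:Int)+1+1) xs).drop (m + 1 - p.length)
          = (pvEntriesF f ((j:Int)+1+1) xs).drop (m + 1 - (p.length + 1)) := by
        rw [show m + 1 - p.length = (m + 1 - (p.length + 1)) + 1 by omega]
        simp
      rw [htk, hdr]
      simp

-- One step of range(a, b, s) for a positive step.
theorem pvRange_pos_cons (a b s : Int) (hs : 0 < s) (hab : a < b) :
    PySem.List.pyRange a b s = a :: PySem.List.pyRange (a + s) b s := by
  rw [PySem.List.pyRange_of_pos _ _ hs, PySem.List.pyRange_of_pos _ _ hs]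
  have ht : 0 ≤ b - a - 1 := by omega
  have hcount : ((b - a + s - 1) / s) = (b - a - 1) / s + 1 := by
    rw [show b - a + s - 1 = (b - a - 1) + 1 * s by ring]
    exact Int.add_mul_ediv_right _ _ (by omega)
  have hnn : 0 ≤ (b - a - 1) / s := Int.ediv_nonneg ht (by omega)
  rw [if_pos hab, hcount]
  have htoNat : ((b - a - 1) / s + 1).toNat = ((b - a - 1) / s).toNat + 1 := by omega
  rw [htoNat, List.range_succ_eq_map, List.map_cons, List.map_map]
  congr 1
  · simp
  · by_cases h2 : a + s < b
    · rw [if_pos h2]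
      have : b - (a + s) + s - 1 = b - a - 1 := by ring
      rw [this]
      apply List.map_congr_left
      intro k _
      simp [Function.comp]
      ring
    · rw [if_neg h2]
      have : (b - a - 1) / s = 0 := Int.ediv_eq_zero_of_lt ht (by omega)
      simp [this]

-- B's stepped-slice reshape equals pvChunks, by induction on the remaining length.
theorem pvRangeSlice {α : Type} (m : Nat) :
    ∀ (d : Nat) (es : List α) (a : Nat), es.length ≤ a + d →
    (PySem.List.pyRange (a : Int) ((es.length : Nat) : Int) ((m : Int) + 1)).map
        (fun i => PySem.List.slice es (some i) (some (i + ((m : Int) + 1))))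
      = pvChunks m (es.drop a) := by
  intro d
  induction d with
  | zero =>
    intro es a h
    have h1 : ¬ ((a : Int) < (es.length : Int)) := by exact_mod_cast not_lt.mpr h
    rw [PySem.List.pyRange_of_pos _ _ (by omega : (0:Int) < (m:Int)+1)]
    rw [if_neg h1]
    rw [List.drop_eq_nil_of_le (by omega : es.length ≤ a)]
    simp [pvChunks]
  | succ d ih =>
    intro es a h
    by_cases hlt : a < es.length
    · rw [pvRange_pos_cons _ _ _ (by omega : (0:Int) < (m:Int)+1) (by exact_mod_cast hlt)]
      rw [List.map_cons]
      have hslice : PySem.List.slice es (some (a : Int)) (some ((a : Int) + ((m : Int) + 1)))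
          = (es.drop a).take (m + 1) := by
        have : (a : Int) + ((m : Int) + 1) = (a : Int) + ((m + 1 : Nat) : Int) := by push_cast; ring
        rw [this, PySem.List.slice_natCast_add]
      rw [hslice]
      have hcast : (a : Int) + ((m : Int) + 1) = ((a + (m + 1) : Nat) : Int) := by push_cast; ring
      rw [hcast, ih es (a + (m + 1)) (by omega)]
      obtain ⟨y, ys, hys⟩ : ∃ y ys, es.drop a = y :: ys := by
        cases hd : es.drop a with
        | nil => exfalso; have := List.drop_eq_nil_iff.mp hd; omega
        | cons y ys => exact ⟨y, ys, rfl⟩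
      rw [show es.drop (a + (m + 1)) = (es.drop a).drop (m + 1) by rw [List.drop_drop]]
      rw [hys]
      simp [pvChunks]
    · have h1 : ¬ ((a : Int) < (es.length : Int)) := by exact_mod_cast hlt
      rw [PySem.List.pyRange_of_pos _ _ (by omega : (0:Int) < (m:Int)+1)]
      rw [if_neg h1]
      rw [List.drop_eq_nil_of_le (by omega)]
      simp [pvChunks]

-- ===== VERDICT (by name: the statement is the Claim_ definition above) =====
theorem BuildCourseList_py_spec : Claim_equal_BuildCourseList_py := by
  intro course_list course_map user_progress ncols _ hpre
  unfold Spec_BuildCourseList_py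
  obtain ⟨m, rfl⟩ : ∃ m : Nat, ncols = (m : Int) + 1 :=
    ⟨(ncols - 1).toNat, by unfold Pre_BuildCourseList_py at hpre; omega⟩
  set f : Int → String → Int × String × String × String × Bool := fun i id =>
    (i + 1, id, (PySem.Dict.getD (PySem.Dict.mk course_map) id ("", "")).1,
      (PySem.Dict.getD (PySem.Dict.mk course_map) id ("", "")).2,
      PySem.Dict.getD (PySem.Dict.mk user_progress) id false) with hf
  have hB : BuildCourseList_py_alt course_list course_map user_progress ((m : Int) + 1)
      = pvChunks m (pvEntriesF f 0 course_list) := by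
    have h2 := pvRangeSlice m (pvEntriesF f 0 course_list).length (pvEntriesF f 0 course_list) 0 (by omega)
    rw [List.drop_zero] at h2
    exact h2
  rw [hB]
  cases course_list with
  | nil =>
    unfold BuildCourseList_py
    simp [PySem.List.enumerate, pvEntriesF_nil, pvChunks]
  | cons x xs =>
    have key := pvFoldA m f xs 0 [] [f 0 x] (by simp)
    simp only [Nat.cast_zero, List.nil_append] at key
    unfold BuildCourseList_py
    rw [PySem.List.enumerate_cons, List.foldl_cons]
    have h0 : (PySem.Int.mod 0 ((m : Int) + 1) == 0) = true := by
      have h := PySem.Int.mod_natCast 0 (m + 1)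
      simp only [Nat.cast_zero] at h
      simp [h]
    simp only [h0, if_true, List.nil_append]
    have hstep : pvAppendLast [[]] (f 0 x) = [[f 0 x]] := by simp [pvAppendLast]
    rw [hstep, key, pvEntriesF_cons]
    simp [pvChunks]
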